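-- pv_equiv track=rewrite | github.com/Calebe94/XTeam | SteamAPI.py | path2UNIX
-- ===== SOURCE A (Python) =====
-- def path2UNIX(path):
--     aux=str()
--     for index in range(0,len(path)):
--         if path[index] == '\'':
--             aux=aux+'\\'
--         elif path[index] == ' ':
--             aux=aux+'\\'
--         aux=aux+path[index]
--         index=index+1
--     return aux
-- ===== SOURCE B (Python) =====
-- def path2UNIX(path):
--     return path.replace("'", "\\'").replace(" ", "\\ ")
-- ===== Notes on version B (the rewrite author's own statement) =====
-- stated objective: idiomatic
-- what changed: Replaced the per-character index loop and branch chain with two chained str.replace passes (quote-escape first, then space-escape), which are independent because the first introduces no spaces and the second no quotes.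
import Mathlib
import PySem

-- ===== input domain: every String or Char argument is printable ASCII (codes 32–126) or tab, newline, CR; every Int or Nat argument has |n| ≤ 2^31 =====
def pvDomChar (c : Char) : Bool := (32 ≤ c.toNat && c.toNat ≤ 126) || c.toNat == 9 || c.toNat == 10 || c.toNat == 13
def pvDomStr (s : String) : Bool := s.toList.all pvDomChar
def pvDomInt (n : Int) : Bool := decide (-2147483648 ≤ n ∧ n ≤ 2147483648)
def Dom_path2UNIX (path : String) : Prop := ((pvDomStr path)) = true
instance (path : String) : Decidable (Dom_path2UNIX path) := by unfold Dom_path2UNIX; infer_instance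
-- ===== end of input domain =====

-- B replaces A's per-character index loop with two chained str.replace passes (idiomatic).

-- ===== PORT A =====
-- A: for index in range(0, len(path)): branch on path[index], append '\' then the char.
-- path[index] is always in range here, so pyGetD's default is never used.
def path2UNIX (path : String) : String :=
  String.ofList <|
    (PySem.List.pyRange 0 (PySem.List.len path.toList)).foldl
      (fun aux index =>
        (if PySem.List.pyGetD path.toList index ' ' = '\'' then aux ++ ['\\']
         else if PySem.List.pyGetD path.toList index ' ' = ' ' then aux ++ ['\\'] else aux)
        ++ [PySem.List.pyGetD path.toList index ' ']) []

-- ===== PORT B =====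
def path2UNIX_alt (path : String) : String :=
  PySem.Str.replace (PySem.Str.replace path "'" "\\'") " " "\\ "

-- ===== PRECONDITION & SPEC =====
def Spec_path2UNIX (path : String) (out : String) : Prop := out = path2UNIX_alt path
instance (path : String) (out : String) : Decidable (Spec_path2UNIX path out) := by unfold Spec_path2UNIX; infer_instance

-- ===== CLAIM (what is proved, stated in full; the proofs are below) =====
def Claim_equal_path2UNIX : Prop := ∀ (path : String), Dom_path2UNIX path → Spec_path2UNIX path (path2UNIX path)

-- ===== LEMMAS AND PROOFS =====

-- replace with a single-character pattern is a per-character flatMap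
theorem replace_go_single (q : Char) (ns : List Char) :
    ∀ (fuel : Nat) (l acc : List Char), l.length ≤ fuel →
      PySem.Chars.replace.go [q] ns fuel l acc
        = acc.reverse ++ l.flatMap (fun c => if c = q then ns else [c]) := by
  intro fuel
  induction fuel with
  | zero =>
    intro l acc h
    have : l = [] := List.eq_nil_of_length_eq_zero (Nat.le_zero.mp h)
    subst this
    simp [PySem.Chars.replace.go]
  | succ n ih =>
    intro l acc h
    cases l with
    | nil => simp [PySem.Chars.replace.go]
    | cons c t =>
      simp only [PySem.Chars.replace.go]
      by_cases hcq : c = q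
      · subst hcq
        have hpre : List.isPrefixOf [c] (c :: t) = true := by
          simp [List.isPrefixOf]
        rw [if_pos hpre]
        rw [show List.drop [c].length (c :: t) = t from by simp]
        rw [ih t (ns.reverse ++ acc) (Nat.le_of_succ_le_succ h)]
        simp [List.flatMap_cons]
      · have hpre : List.isPrefixOf [q] (c :: t) = false := by
          simp [List.isPrefixOf, beq_iff_eq]
          intro h'; exact absurd h'.symm hcq
        rw [if_neg (by simp [hpre])]
        rw [ih t (c :: acc) (Nat.le_of_succ_le_succ h)]
        simp [List.flatMap_cons, hcq]

theorem replace_single (q : Char) (ns cs : List Char) :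
    PySem.Chars.replace cs [q] ns = cs.flatMap (fun c => if c = q then ns else [c]) := by
  simp only [PySem.Chars.replace, List.isEmpty_cons, if_false]
  simpa using replace_go_single q ns cs.length cs [] (le_refl _)

-- the combined per-character escape
def pvEscape (c : Char) : List Char :=
  if c = '\'' then ['\\', '\'']
  else if c = ' ' then ['\\', ' ']
  else [c]

theorem alt_eq_flatMap (path : String) :
    (path2UNIX_alt path).toList = path.toList.flatMap pvEscape := by
  simp only [path2UNIX_alt, PySem.Str.toList_replace]
  rw [show ("'" : String).toList = ['\''] from rfl,
      show ("\\'" : String).toList = ['\\', '\''] from rfl,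
      show (" " : String).toList = [' '] from rfl,
      show ("\\ " : String).toList = ['\\', ' '] from rfl]
  rw [replace_single, replace_single, List.flatMap_assoc]
  apply List.flatMap_congr
  intro c _
  by_cases h1 : c = '\''
  · subst h1; simp [pvEscape]
  · by_cases h2 : c = ' '
    · subst h2; simp [pvEscape]
    · simp [pvEscape, h1, h2]

theorem a_eq_flatMap (path : String) :
    path2UNIX path = String.ofList (path.toList.flatMap pvEscape) := by
  unfold path2UNIX
  congr 1
  have key := PySem.List.foldl_pyRange_pyGetD path.toList ' '
    (fun aux c =>
      (if c = '\'' then aux ++ ['\\'] else if c = ' ' then aux ++ ['\\'] else aux) ++ [c])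
    ([] : List Char) (a := 0) (le_refl 0)
  calc List.foldl
        (fun aux index =>
          (if PySem.List.pyGetD path.toList index ' ' = '\'' then aux ++ ['\\']
           else if PySem.List.pyGetD path.toList index ' ' = ' ' then aux ++ ['\\'] else aux)
          ++ [PySem.List.pyGetD path.toList index ' '])
        [] (PySem.List.pyRange 0 (PySem.List.len path.toList))
      = List.foldl
          (fun aux c =>
            (if c = '\'' then aux ++ ['\\'] else if c = ' ' then aux ++ ['\\'] else aux) ++ [c])
          [] (List.drop (0 : Int).toNat path.toList) := key
    _ = List.foldl
          (fun aux c => aux ++ pvEscape c) [] path.toList := by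
        simp only [Int.toNat_zero, List.drop_zero]
        congr 1
        funext aux c
        unfold pvEscape
        split_ifs <;> simp_all
    _ = [] ++ path.toList.flatMap pvEscape :=
        PySem.List.foldl_append_eq_flatMap pvEscape path.toList []
    _ = path.toList.flatMap pvEscape := by simp

-- ===== VERDICT (by name: the statement is the Claim_ definition above) =====
theorem path2UNIX_spec : Claim_equal_path2UNIX := by
  intro path _
  unfold Spec_path2UNIX
  rw [a_eq_flatMap, ← alt_eq_flatMap path]
  exact String.ofList_toList
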